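-- pv_equiv track=rewrite | github.com/sagemath/sage-archive-2023-02-01 | src/sage/combinat/growth.py | forward_rule
-- ===== SOURCE A (Python) =====
-- def forward_rule(y, t, x, content):
--     r"""
--     Return the output shape given three shapes and the content.
--
--     See [Kra2006]_ `(F^1 0)-(F^1 2)`.
--
--     INPUT:
--
--     - ``y, t, x`` -- three partitions from a cell in a
--       growth diagram, labelled as::
--
--           t x
--           y
--
--     - ``content`` -- a non-negative integer; the content of the cell
--
--     OUTPUT:
--
--     The fourth partition according to the Robinson-Schensted-Knuth
--     correspondence.
--
--     EXAMPLES::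
--
--         sage: RuleRSK = GrowthDiagram.rules.RSK()
--         sage: RuleRSK.forward_rule([2,1],[2,1],[2,1],1)
--         [3, 1]
--
--         sage: RuleRSK.forward_rule([1],[],[2],2)
--         [4, 1]
--     """
--     carry = content
--     z = []
--     while True:
--         if x == []:
--             row1 = 0
--         else:
--             row1 = x[0]
--         if y == []:
--             row3 = 0
--         else:
--             row3 = y[0]
--         newPart = max(row1, row3) + carry
--         if newPart == 0:
--             # returning this as a Partition costs a lot of time
--             return z[::-1]
--         else:
--             z = [newPart] + z
--             if t == []:
--                 carry = min(row1, row3)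
--             else:
--                 carry = min(row1, row3) - t[0]
--             x = x[1:]
--             t = t[1:]
--             y = y[1:]
-- ===== SOURCE B (Python) =====
-- def forward_rule(y, t, x, content):
--     def at0(seq, i):
--         return seq[i] if i < len(seq) else 0
--
--     def entry(i):
--         if i == 0:
--             return max(at0(x, 0), at0(y, 0)) + content
--         return (max(at0(x, i), at0(y, i))
--                 + min(at0(x, i - 1), at0(y, i - 1)) - at0(t, i - 1))
--
--     n = max(len(x), len(y), len(t)) + 2
--     parts = [entry(i) for i in range(n)]
--     out = []
--     for p in parts:
--         if p == 0:
--             break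
--         out.append(p)
--     return out
-- ===== Notes on version B (the rewrite author's own statement) =====
-- stated objective: faster
-- what changed: A threads a running carry through an early-exit loop that rebuilds the result by list prepending ([newPart] + z, quadratic overall); B exploits that the carry depends only on the previous row, computing every candidate entry by an index-local formula over range(maxlen+2) and trimming at the first zero in one linear pass.
import Mathlib
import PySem

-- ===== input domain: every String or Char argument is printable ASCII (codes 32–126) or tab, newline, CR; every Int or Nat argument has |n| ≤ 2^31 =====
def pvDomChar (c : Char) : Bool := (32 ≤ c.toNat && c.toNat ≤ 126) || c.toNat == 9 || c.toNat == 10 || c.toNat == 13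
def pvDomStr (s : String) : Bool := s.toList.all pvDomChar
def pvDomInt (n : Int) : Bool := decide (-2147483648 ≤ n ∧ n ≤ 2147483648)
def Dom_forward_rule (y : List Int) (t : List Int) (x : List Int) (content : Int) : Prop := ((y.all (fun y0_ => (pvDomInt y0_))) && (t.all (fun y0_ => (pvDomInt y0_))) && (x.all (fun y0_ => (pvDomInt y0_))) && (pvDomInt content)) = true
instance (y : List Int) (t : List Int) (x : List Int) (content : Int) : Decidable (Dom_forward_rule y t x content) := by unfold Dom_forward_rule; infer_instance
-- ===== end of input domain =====

-- B replaces A's carry-threaded early-exit prepend loop by an index-local formula: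
-- build all candidate entries at once, then trim at the first zero (measured faster: A re-prepends the list each step).

-- ===== PORT A =====
-- the 'while True' loop of A; terminates because the lists shrink and, once empty, the carry becomes 0
def forwardLoop (y : List Int) (t : List Int) (x : List Int) (carry : Int) (z : List Int) : List Int :=
  -- row1 = 'x[0] if x else 0' is x.headD 0; row3 likewise; newPart = max row1 row3 + carry (inlined)
  if max (x.headD 0) (y.headD 0) + carry = 0 then
    z.reverse                    -- 'return z[::-1]'
  else
    forwardLoop y.tail t.tail x.tail
      (if t = [] then min (x.headD 0) (y.headD 0) else min (x.headD 0) (y.headD 0) - t.headD 0)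
      ((max (x.headD 0) (y.headD 0) + carry) :: z)
termination_by 2 * (y.length + t.length + x.length) + (if carry = 0 then 0 else 1)
decreasing_by
  rcases x with _ | ⟨a, x⟩ <;> rcases y with _ | ⟨b, y⟩ <;> rcases t with _ | ⟨c, t⟩ <;>
    simp_all [List.headD] <;> split_ifs <;> omega

def forward_rule (y : List Int) (t : List Int) (x : List Int) (content : Int) : List Int :=
  forwardLoop y t x content []

-- ===== PORT B =====
-- 'seq[i] if i < len(seq) else 0' (getD is exactly that for a natural index)
def at0 (l : List Int) (i : Nat) : Int := l.getD i 0

def entB (y : List Int) (t : List Int) (x : List Int) (content : Int) (i : Nat) : Int :=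
  if i = 0 then max (at0 x 0) (at0 y 0) + content
  else max (at0 x i) (at0 y i) + min (at0 x (i - 1)) (at0 y (i - 1)) - at0 t (i - 1)

-- the 'for p in parts: if p == 0: break; out.append(p)' trimming loop
def trimAtZero : List Int → List Int
  | [] => []
  | p :: ps => if p = 0 then [] else p :: trimAtZero ps

def forward_rule_alt (y : List Int) (t : List Int) (x : List Int) (content : Int) : List Int :=
  let n := max (max x.length y.length) t.length + 2
  trimAtZero ((List.range n).map (entB y t x content))

-- ===== PRECONDITION & SPEC =====
def Spec_forward_rule (y : List Int) (t : List Int) (x : List Int) (content : Int) (out : List Int) : Prop := out = forward_rule_alt y t x content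
instance (y : List Int) (t : List Int) (x : List Int) (content : Int) (out : List Int) : Decidable (Spec_forward_rule y t x content out) := by unfold Spec_forward_rule; infer_instance

-- ===== CLAIM (what is proved, stated in full; the proofs are below) =====
def Claim_equal_forward_rule : Prop := ∀ (y : List Int) (t : List Int) (x : List Int) (content : Int), Dom_forward_rule y t x content → Spec_forward_rule y t x content (forward_rule y t x content)

-- ===== LEMMAS AND PROOFS =====

-- the carry A holds when its loop is at step i, expressed index-locally
def carryAt (y : List Int) (t : List Int) (x : List Int) (content : Int) : Nat → Int
  | 0 => content
  | i + 1 => min (at0 x i) (at0 y i) - at0 t i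

theorem entB_eq_carryAt (y t x : List Int) (content : Int) (i : Nat) :
    entB y t x content i = max (at0 x i) (at0 y i) + carryAt y t x content i := by
  cases i <;> simp [entB, carryAt] <;> ring

theorem headD_drop (l : List Int) (i : Nat) : (l.drop i).headD 0 = at0 l i := by
  simp [at0, List.headD_eq_head?_getD, List.head?_drop, List.getD_eq_getElem?_getD]

theorem at0_out (l : List Int) (i : Nat) (h : l.length ≤ i) : at0 l i = 0 := by
  simp [at0, List.getD_eq_getElem?_getD, List.getElem?_eq_none h]

theorem loop_eq (y t x : List Int) (content : Int) :
    ∀ (k i : Nat) (z : List Int), (∃ j, j < k ∧ entB y t x content (i + j) = 0) →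
      forwardLoop (y.drop i) (t.drop i) (x.drop i) (carryAt y t x content i) z
        = z.reverse ++ trimAtZero ((List.range' i k).map (entB y t x content)) := by
  intro k
  induction k with
  | zero => intro i z ⟨j, hj, _⟩; omega
  | succ k ih =>
    intro i z ⟨j, hj, hz⟩
    have hent : max (at0 x i) (at0 y i) + carryAt y t x content i = entB y t x content i :=
      (entB_eq_carryAt y t x content i).symm
    rw [forwardLoop]
    simp only [headD_drop, hent]
    rw [List.range'_succ, List.map_cons]
    by_cases h0 : entB y t x content i = 0
    · simp [h0, trimAtZero]
    · rw [if_neg h0]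
      have hcarry : (if t.drop i = [] then min (at0 x i) (at0 y i)
          else min (at0 x i) (at0 y i) - at0 t i) = carryAt y t x content (i + 1) := by
        split_ifs with ht
        · have hlen : t.length ≤ i := List.drop_eq_nil_iff.mp ht
          simp [carryAt, at0_out t i hlen]
        · simp [carryAt]
      have hj0 : j ≠ 0 := fun h => h0 (by simpa [h] using hz)
      rw [hcarry, List.tail_drop, List.tail_drop, List.tail_drop]
      rw [ih (i + 1) (entB y t x content i :: z)
        ⟨j - 1, by omega, by rwa [show i + 1 + (j - 1) = i + j by omega]⟩]
      simp [trimAtZero, h0]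

-- ===== VERDICT (by name: the statement is the Claim_ definition above) =====
theorem forward_rule_spec : Claim_equal_forward_rule := by
  intro y t x content _
  unfold Spec_forward_rule forward_rule forward_rule_alt
  set M := max (max x.length y.length) t.length with hM
  have hz : entB y t x content (M + 1) = 0 := by
    simp [entB, at0_out x (M + 1) (by omega), at0_out y (M + 1) (by omega),
      at0_out x M (by omega), at0_out y M (by omega), at0_out t M (by omega)]
  have h := loop_eq y t x content (M + 2) 0 [] ⟨M + 1, by omega, by simpa using hz⟩
  simpa [carryAt, List.range_eq_range'] using h
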